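-- pv_equiv track=rewrite | github.com/WingkySky/ExcelMerge | src/excel/merger.py | sanitize_sheet_name
-- ===== SOURCE A (Python) =====
-- def sanitize_sheet_name(sheet_name):
--     """确保sheet名称有效"""
--     # Excel的sheet名称限制：
--     # 1. 长度不能超过31个字符
--     # 2. 不能包含特殊字符: [ ] : * ? / \
--     # 3. 不能为空
--
--     # 移除非法字符
--     invalid_chars = r'[]*?/\\'
--     for char in invalid_chars:
--         sheet_name = sheet_name.replace(char, '_')
--
--     # 限制长度
--     if len(sheet_name) > 31:
--         sheet_name = sheet_name[:31]
--
--     # 确保不为空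
--     if not sheet_name:
--         sheet_name = "Sheet1"
--
--     return sheet_name
-- ===== SOURCE B (Python) =====
-- def sanitize_sheet_name(sheet_name):
--     """确保sheet名称有效"""
--     # Truncate first (the fold over chars below preserves length, so order is
--     # interchangeable with A's truncate-last), then sanitize recursively.
--     def fix(s):
--         if not s:
--             return ''
--         head = '_' if s[0] in '[]*?/\\' else s[0]
--         return head + fix(s[1:])
--     s = fix(sheet_name[:31])
--     return s if s else "Sheet1"
-- ===== Notes on version B (the rewrite author's own statement) =====
-- stated objective: alternative
-- what changed: Replaces A's seven whole-string replace passes followed by truncation with truncate-first (sheet_name[:31]) and then a single structural recursion over the remaining at most 31 characters that maps each invalid character to '_'; correct because the character map preserves length, so truncation commutes with it.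
import Mathlib
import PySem

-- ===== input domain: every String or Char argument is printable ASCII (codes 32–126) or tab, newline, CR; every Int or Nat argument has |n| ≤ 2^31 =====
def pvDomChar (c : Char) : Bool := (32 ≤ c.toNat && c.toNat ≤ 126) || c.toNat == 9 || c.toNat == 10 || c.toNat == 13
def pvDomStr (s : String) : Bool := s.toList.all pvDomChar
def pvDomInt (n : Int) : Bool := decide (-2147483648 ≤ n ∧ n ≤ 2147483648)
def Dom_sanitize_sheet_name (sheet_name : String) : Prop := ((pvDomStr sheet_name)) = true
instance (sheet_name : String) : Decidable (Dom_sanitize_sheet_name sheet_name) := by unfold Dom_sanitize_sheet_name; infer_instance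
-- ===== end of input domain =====

-- B truncates to 31 characters first and then sanitizes the remaining bounded tail by a
-- structural recursion over the characters (a different decomposition from A's seven
-- whole-string replace passes followed by truncation); correct since the map preserves length.


-- ===== PORT A =====
-- literal port: for each char of r'[]*?/\\' (7 chars, backslash twice) do a whole-string
-- replace, then truncate to 31, then the empty default
def sanitize_sheet_name (sheet_name : String) : String :=
  let invalid_chars : List Char := ['[', ']', '*', '?', '/', '\\', '\\']
  let s := invalid_chars.foldl (fun s c => PySem.Str.replace s (String.ofList [c]) "_") sheet_name
  let s := if PySem.Str.len s > 31 then PySem.Str.slice s none (some 31) else s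
  if s = "" then "Sheet1" else s

-- ===== PORT B =====
-- literal port of Source B's inner `fix`: structural recursion over the characters, mapping a
-- character that is in '[]*?/\' to '_' and keeping it otherwise
def pvFix : List Char → List Char
  | [] => []
  | c :: t => (if c ∈ (['[', ']', '*', '?', '/', '\\'] : List Char) then '_' else c) :: pvFix t

-- literal port of Source B: truncate to 31 first (sheet_name[:31]), then fix, then `s or "Sheet1"`
def sanitize_sheet_name_alt (sheet_name : String) : String :=
  let s := String.ofList (pvFix (PySem.Str.slice sheet_name none (some 31)).toList)
  if s = "" then "Sheet1" else s

-- ===== PRECONDITION & SPEC =====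
def Spec_sanitize_sheet_name (sheet_name : String) (out : String) : Prop := out = sanitize_sheet_name_alt sheet_name
instance (sheet_name : String) (out : String) : Decidable (Spec_sanitize_sheet_name sheet_name out) := by unfold Spec_sanitize_sheet_name; infer_instance

-- ===== CLAIM (what is proved, stated in full; the proofs are below) =====
def Claim_equal_sanitize_sheet_name : Prop := ∀ (sheet_name : String), Dom_sanitize_sheet_name sheet_name → Spec_sanitize_sheet_name sheet_name (sanitize_sheet_name sheet_name)

-- ===== LEMMAS AND PROOFS =====

-- the character map both programs perform
def pvMapChar (c : Char) : Char :=
  if c ∈ (['[', ']', '*', '?', '/', '\\'] : List Char) then '_' else c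

-- B's recursion is the character map
theorem pvFix_eq_map (l : List Char) : pvFix l = l.map pvMapChar := by
  induction l with
  | nil => rfl
  | cons c t ih => simp [pvFix, pvMapChar, ih]

-- Chars.replace.go with a single-char pattern is exactly a character map (fuel ≥ length never runs out)
theorem pv_go_single (c : Char) (l : List Char) : ∀ (fuel : Nat) (acc : List Char), l.length ≤ fuel →
    PySem.Chars.replace.go [c] ['_'] fuel l acc
      = acc.reverse ++ l.map (fun x => if x = c then '_' else x) := by
  induction l with
  | nil => intro fuel acc _; cases fuel <;> simp [PySem.Chars.replace.go]
  | cons h t ih =>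
    intro fuel acc hle
    cases fuel with
    | zero => simp at hle
    | succ n =>
      simp only [PySem.Chars.replace.go]
      by_cases hc : h = c
      · subst hc
        rw [if_pos (by simp)]
        simp only [List.length_cons, List.length_nil, Nat.zero_add, List.drop_succ_cons,
          List.drop_zero]
        rw [ih n _ (by simpa using hle)]
        simp
      · rw [if_neg (by simp [List.isPrefixOf, Ne.symm hc])]
        rw [ih n _ (by simpa using hle)]
        simp [hc]

-- replacing one character by '_' is a map over the characters
theorem pv_replace_single (cs : List Char) (c : Char) :
    PySem.Chars.replace cs [c] ['_'] = cs.map (fun x => if x = c then '_' else x) := by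
  simp [PySem.Chars.replace, pv_go_single c cs cs.length [] le_rfl]

-- the seven sequential replaces of A produce exactly the single membership map
set_option maxHeartbeats 1000000 in
theorem pv_fold_eq_map (s : String) :
    (['[', ']', '*', '?', '/', '\\', '\\'].foldl
        (fun s c => PySem.Str.replace s (String.ofList [c]) "_") s)
      = String.ofList (s.toList.map pvMapChar) := by
  rw [← String.toList_inj]
  simp only [List.foldl_cons, List.foldl_nil]
  simp only [PySem.Str.toList_replace, String.toList_ofList,
    show ("_" : String).toList = ['_'] from rfl, pv_replace_single, List.map_map]
  apply List.map_congr_left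
  intro x _
  simp only [Function.comp, pvMapChar]
  by_cases h1 : x = '[' <;> by_cases h2 : x = ']' <;> by_cases h3 : x = '*' <;>
    by_cases h4 : x = '?' <;> by_cases h5 : x = '/' <;> by_cases h6 : x = '\\' <;>
    simp_all

-- ===== VERDICT (by name: the statement is the Claim_ definition above) =====
theorem sanitize_sheet_name_spec : Claim_equal_sanitize_sheet_name := by
  intro sheet_name _
  unfold Spec_sanitize_sheet_name sanitize_sheet_name sanitize_sheet_name_alt
  simp only [pv_fold_eq_map, pvFix_eq_map]
  -- both sides are `ofList ((toList sheet_name).take 31 |>.map pvMapChar)` up to the final default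
  have hA : (if PySem.Str.len (String.ofList (sheet_name.toList.map pvMapChar)) > 31
        then PySem.Str.slice (String.ofList (sheet_name.toList.map pvMapChar)) none (some 31)
        else String.ofList (sheet_name.toList.map pvMapChar))
      = String.ofList ((PySem.Str.slice sheet_name none (some 31)).toList.map pvMapChar) := by
    rw [← String.toList_inj]
    by_cases h : PySem.Str.len (String.ofList (sheet_name.toList.map pvMapChar)) > 31
    · rw [if_pos h]
      rw [PySem.Str.toList_slice, PySem.Str.toList_slice, PySem.Chars.slice_eq_listSlice,
        PySem.Chars.slice_eq_listSlice, PySem.List.slice_to _ (by norm_num),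
        PySem.List.slice_to _ (by norm_num)]
      simp [List.map_take]
    · rw [if_neg h]
      have hlen : sheet_name.toList.length ≤ 31 := by
        simpa [PySem.Str.len] using h
      rw [PySem.Str.toList_slice, PySem.Chars.slice_eq_listSlice,
        PySem.List.slice_to _ (by norm_num)]
      simp [List.take_of_length_le hlen, List.map_take]
  rw [hA]
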